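-- pv_equiv track=rewrite | github.com/DanilaLabydin/Python-tasks-solving-practice | algorithms/find_country.py | find_country
-- ===== SOURCE A (Python) =====
-- def find_country(
--     N,
--     min_income,
--     higher_education,
--     direct_children,
--     Q,
--     income,
--     has_higher_education,
--     parents_citizenship,
-- ):
--     chosen_countries = (
--         min(
--             {
--                 i + 1
--                 for i in range(N)
--                 if (direct_children[i] == 1 and parents_citizenship[j] == i + 1)
--                 or (
--                     income[j] >= min_income[i]
--                     and has_higher_education[j] >= higher_education[i]
--                 )
--             },
--             default=0,
--         )
--         for j in range(Q)
--     )
--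
--     return chosen_countries
-- ===== SOURCE B (Python) =====
-- def find_country(
--     N,
--     min_income,
--     higher_education,
--     direct_children,
--     Q,
--     income,
--     has_higher_education,
--     parents_citizenship,
-- ):
--     # Offline sweep: process queries in increasing order of income, inserting
--     # countries (sorted by their income requirement) into a Pareto frontier of
--     # undominated (education_requirement, country_number) pairs; each query is
--     # answered from the (small) frontier, and the citizenship candidate is an
--     # O(1) lookup combined at the end.
--     countries = sorted(range(N), key=lambda i: min_income[i])
--     order = sorted(range(Q), key=lambda j: income[j])
--     res = [0] * Q
--     frontier = []  # undominated (education requirement, country number) pairs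
--     k = 0
--     for j in order:
--         inc = income[j]
--         while k < len(countries) and min_income[countries[k]] <= inc:
--             i = countries[k]
--             e, v = higher_education[i], i + 1
--             if not any(e2 <= e and v2 <= v for (e2, v2) in frontier):
--                 frontier = [
--                     (e2, v2) for (e2, v2) in frontier if not (e <= e2 and v <= v2)
--                 ] + [(e, v)]
--             k += 1
--         edu = has_higher_education[j]
--         t = min((v for (e, v) in frontier if e <= edu), default=0)
--         p = parents_citizenship[j]
--         c = p if 1 <= p <= N and direct_children[p - 1] == 1 else 0
--         res[j] = t if c == 0 else (c if t == 0 else min(c, t))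
--     return res
-- ===== Notes on version B (the rewrite author's own statement) =====
-- stated objective: faster
-- what changed: A builds, per query, the full qualifying set over range(N) and takes min(..., default=0); B is an offline sweep: it sorts countries by income requirement and queries by income, merges them with a two-pointer loop while maintaining a pruned Pareto frontier of undominated (education requirement, country number) pairs, answers each query from the frontier plus an O(1) citizenship lookup, and writes answers back into query order.
-- outside the precondition, e.g. on find_country(2, [], [], [], 0, [], [], []): A returns [], B raises IndexError; on find_country(1, [], [], [1], 1, [5], [0], [1]): A returns [1], B raises IndexError; on find_country(0, [], [], [], 2, [7], [], []): A returns [0, 0], B raises IndexError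
import Mathlib
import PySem

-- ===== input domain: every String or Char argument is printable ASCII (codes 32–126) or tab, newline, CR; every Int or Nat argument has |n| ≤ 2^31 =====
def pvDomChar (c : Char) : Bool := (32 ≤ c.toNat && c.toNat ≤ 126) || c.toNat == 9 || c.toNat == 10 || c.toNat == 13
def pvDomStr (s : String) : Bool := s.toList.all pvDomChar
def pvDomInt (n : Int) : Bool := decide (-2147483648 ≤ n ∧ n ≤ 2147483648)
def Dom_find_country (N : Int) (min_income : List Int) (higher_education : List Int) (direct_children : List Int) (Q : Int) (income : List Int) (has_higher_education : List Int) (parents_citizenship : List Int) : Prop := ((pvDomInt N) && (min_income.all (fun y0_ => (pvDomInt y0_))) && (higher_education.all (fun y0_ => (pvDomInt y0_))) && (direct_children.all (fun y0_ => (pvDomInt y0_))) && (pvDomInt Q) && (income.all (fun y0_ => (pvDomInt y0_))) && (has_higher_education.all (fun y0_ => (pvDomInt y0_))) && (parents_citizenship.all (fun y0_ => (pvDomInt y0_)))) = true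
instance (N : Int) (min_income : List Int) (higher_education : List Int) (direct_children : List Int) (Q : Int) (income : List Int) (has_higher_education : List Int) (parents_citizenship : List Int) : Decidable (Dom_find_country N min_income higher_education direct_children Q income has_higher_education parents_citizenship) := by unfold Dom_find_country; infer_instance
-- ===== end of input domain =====

-- ===== PORT A =====
-- B replaces A's per-query set comprehension + min by an offline sweep: countries sorted by
-- income requirement, queries sorted by income, a pruned Pareto frontier of (education
-- requirement, country number) pairs, answers written back into query order (return value only).
def find_country (N : Int) (min_income : List Int) (higher_education : List Int) (direct_children : List Int) (Q : Int) (income : List Int) (has_higher_education : List Int) (parents_citizenship : List Int) : List Int :=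
  (PySem.List.pyRange 0 Q 1).map (fun j =>
    PySem.List.minD
      ((PySem.List.pyRange 0 N 1).foldl
        (fun s i =>
          if (PySem.List.pyGetD direct_children i 0 == 1
                && PySem.List.pyGetD parents_citizenship j 0 == i + 1)
              || (decide (PySem.List.pyGetD income j 0 ≥ PySem.List.pyGetD min_income i 0)
                && decide (PySem.List.pyGetD has_higher_education j 0 ≥ PySem.List.pyGetD higher_education i 0))
          then PySem.Set.add s (i + 1) else s)
        PySem.Set.empty)
      (fun x => x) 0)

-- ===== PORT B =====
-- Source B's frontier update: skip a dominated pair, else drop the pairs it dominates and append it.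
def pvFrontInsert (st : List (Int × Int)) (e v : Int) : List (Int × Int) :=
  if st.any (fun p => decide (p.1 ≤ e) && decide (p.2 ≤ v)) then st
  else (st.filter (fun p => !(decide (e ≤ p.1) && decide (v ≤ p.2)))) ++ [(e, v)]

-- Source B's inner `while k < len(countries) and min_income[countries[k]] <= inc` loop:
-- consumes the qualifying prefix of the remaining (income-sorted) countries into the frontier.
def pvAbsorb (min_income higher_education : List Int) (inc : Int) :
    List (Int × Int) → List Int → (List (Int × Int)) × List Int
  | st, [] => (st, [])
  | st, i :: r =>
    if decide (PySem.List.pyGetD min_income i 0 ≤ inc) then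
      pvAbsorb min_income higher_education inc
        (pvFrontInsert st (PySem.List.pyGetD higher_education i 0) (i + 1)) r
    else (st, i :: r)

-- Source B's loop body over one query j; state = (res, frontier, remaining countries).
def pvStep (N : Int) (min_income higher_education direct_children income has_higher_education parents_citizenship : List Int)
    (s : List Int × List (Int × Int) × List Int) (j : Int) : List Int × List (Int × Int) × List Int :=
  let inc := PySem.List.pyGetD income j 0
  let ar := pvAbsorb min_income higher_education inc s.2.1 s.2.2
  let edu := PySem.List.pyGetD has_higher_education j 0
  let t := PySem.List.minD ((ar.1.filter (fun p => decide (p.1 ≤ edu))).map (fun p => p.2)) (fun x => x) 0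
  let p := PySem.List.pyGetD parents_citizenship j 0
  let c := if decide (1 ≤ p) && decide (p ≤ N) && (PySem.List.pyGetD direct_children (p - 1) 0 == 1) then p else 0
  let r := if c == 0 then t else if t == 0 then c else min c t
  (PySem.List.pySetD s.1 j r, ar.1, ar.2)

def find_country_alt (N : Int) (min_income : List Int) (higher_education : List Int) (direct_children : List Int) (Q : Int) (income : List Int) (has_higher_education : List Int) (parents_citizenship : List Int) : List Int :=
  let countries := PySem.List.sorted (PySem.List.pyRange 0 N 1) (fun i => PySem.List.pyGetD min_income i 0) false
  let order := PySem.List.sorted (PySem.List.pyRange 0 Q 1) (fun j => PySem.List.pyGetD income j 0) false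
  (order.foldl (pvStep N min_income higher_education direct_children income has_higher_education parents_citizenship)
    (PySem.List.pyRepeat [(0 : Int)] Q, ([] : List (Int × Int)), countries)).1

-- ===== PRECONDITION & SPEC =====
-- Pre_ excludes the inputs on which Python A raises IndexError (a list shorter than N or Q).
-- It also excludes a few inputs where A returns only because its short-circuiting never reads
-- the too-short list (e.g. Q = 0 with country lists shorter than N, or N = 0 with query lists
-- shorter than Q): B's sort/sweep reads those lists and raises there. The Lean ports are total
-- (pyGetD defaults), so the equivalence proof holds without using Pre_; Pre_ only delimits the
-- inputs on which the two Python programs actually return.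
def Pre_find_country (N : Int) (min_income : List Int) (higher_education : List Int) (direct_children : List Int) (Q : Int) (income : List Int) (has_higher_education : List Int) (parents_citizenship : List Int) : Prop :=
  (0 < N → (N ≤ (min_income.length : Int) ∧ N ≤ (higher_education.length : Int)
      ∧ N ≤ (direct_children.length : Int)))
  ∧ (0 < Q → (Q ≤ (income.length : Int) ∧ Q ≤ (has_higher_education.length : Int)
      ∧ Q ≤ (parents_citizenship.length : Int)))
instance (N : Int) (min_income : List Int) (higher_education : List Int) (direct_children : List Int) (Q : Int) (income : List Int) (has_higher_education : List Int) (parents_citizenship : List Int) : Decidable (Pre_find_country N min_income higher_education direct_children Q income has_higher_education parents_citizenship) := by unfold Pre_find_country; infer_instance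

def pvWitness_find_country : Int × List Int × List Int × List Int × Int × List Int × List Int × List Int :=
  (2, [1, 2], [0, 1], [1, 0], 2, [1, 0], [1, 0], [2, 1])

def Spec_find_country (N : Int) (min_income : List Int) (higher_education : List Int) (direct_children : List Int) (Q : Int) (income : List Int) (has_higher_education : List Int) (parents_citizenship : List Int) (out : List Int) : Prop := out = find_country_alt N min_income higher_education direct_children Q income has_higher_education parents_citizenship
instance (N : Int) (min_income : List Int) (higher_education : List Int) (direct_children : List Int) (Q : Int) (income : List Int) (has_higher_education : List Int) (parents_citizenship : List Int) (out : List Int) : Decidable (Spec_find_country N min_income higher_education direct_children Q income has_higher_education parents_citizenship out) := by unfold Spec_find_country; infer_instance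

-- ===== CLAIM (what is proved, stated in full; the proofs are below) =====
def Claim_equal_find_country : Prop := ∀ (N : Int) (min_income : List Int) (higher_education : List Int) (direct_children : List Int) (Q : Int) (income : List Int) (has_higher_education : List Int) (parents_citizenship : List Int), Dom_find_country N min_income higher_education direct_children Q income has_higher_education parents_citizenship → Pre_find_country N min_income higher_education direct_children Q income has_higher_education parents_citizenship → Spec_find_country N min_income higher_education direct_children Q income has_higher_education parents_citizenship (find_country N min_income higher_education direct_children Q income has_higher_education parents_citizenship)

-- ===== LEMMAS AND PROOFS =====

-- min(l, default=0) (shorthand used only by the proofs)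
def pvM0 (l : List Int) : Int := PySem.List.minD l (fun x => x) 0

-- the intended per-query answer both programs compute
def pvF (N : Int) (min_income higher_education direct_children income has_higher_education parents_citizenship : List Int) (j : Int) : Int :=
  let inc := PySem.List.pyGetD income j 0
  let edu := PySem.List.pyGetD has_higher_education j 0
  let t := pvM0 (((PySem.List.pyRange 0 N 1).filter
      (fun i => decide (PySem.List.pyGetD min_income i 0 ≤ inc) && decide (PySem.List.pyGetD higher_education i 0 ≤ edu))).map (fun i => i + 1))
  let p := PySem.List.pyGetD parents_citizenship j 0
  let c := if decide (1 ≤ p) && decide (p ≤ N) && (PySem.List.pyGetD direct_children (p - 1) 0 == 1) then p else 0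
  if c == 0 then t else if t == 0 then c else min c t

theorem pv_mem_fold (cond : Int → Bool) (l : List Int) (s : PySem.Set Int) (x : Int) :
    x ∈ l.foldl (fun s i => if cond i then PySem.Set.add s (i + 1) else s) s
      ↔ x ∈ s ∨ ∃ i ∈ l, cond i = true ∧ x = i + 1 := by
  induction l generalizing s with
  | nil => simp
  | cons a t ih =>
    simp only [List.foldl_cons, List.mem_cons]
    by_cases h : cond a
    · rw [if_pos h, ih]
      simp only [PySem.Set.mem_add]
      aesop
    · rw [if_neg h, ih]
      aesop

theorem pvM0_spec (l : List Int) (h : l ≠ []) : pvM0 l ∈ l ∧ ∀ x ∈ l, pvM0 l ≤ x := by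
  obtain ⟨m, hm⟩ : ∃ m, PySem.List.min? l (fun x => x) = some m := by
    cases hmin : PySem.List.min? l (fun x => x) with
    | none => exact absurd ((PySem.List.min?_eq_none_iff l _).mp hmin) h
    | some m => exact ⟨m, rfl⟩
  have he : pvM0 l = m := by simp [pvM0, PySem.List.minD, hm]
  rw [he]
  exact ⟨PySem.List.min?_mem hm, fun x hx => PySem.List.min?_isMin hm x hx⟩

theorem pvM0_eq_of_sub_dom (l l' : List Int)
    (h1 : ∀ x ∈ l', x ∈ l) (h2 : ∀ x ∈ l, ∃ y ∈ l', y ≤ x) : pvM0 l = pvM0 l' := by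
  rcases eq_or_ne l' [] with rfl | hne'
  · have hl : l = [] := by
      cases l with
      | nil => rfl
      | cons a t => rcases h2 a (by simp) with ⟨y, hy, _⟩; simp at hy
    rw [hl]
  · have hne : l ≠ [] := by
      cases l' with
      | nil => exact absurd rfl hne'
      | cons a t =>
        intro hl
        have := h1 a (by simp)
        rw [hl] at this
        simp at this
    obtain ⟨hm, hmin⟩ := pvM0_spec l hne
    obtain ⟨hm', hmin'⟩ := pvM0_spec l' hne'
    have ha : pvM0 l ≤ pvM0 l' := hmin _ (h1 _ hm')
    have hb : pvM0 l' ≤ pvM0 l := by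
      rcases h2 _ hm with ⟨y, hy, hyle⟩
      exact le_trans (hmin' y hy) hyle
    omega

theorem pvM0_congr_mem (l l' : List Int) (h : ∀ x, x ∈ l ↔ x ∈ l') : pvM0 l = pvM0 l' := by
  exact pvM0_eq_of_sub_dom l l' (fun x hx => (h x).mpr hx)
    (fun x hx => ⟨x, (h x).mp hx, le_refl x⟩)

-- frontier st faithfully represents the inserted pairs ins
def pvRel (st ins : List (Int × Int)) : Prop :=
  (∀ p ∈ st, p ∈ ins) ∧ ∀ p ∈ ins, ∃ p' ∈ st, p'.1 ≤ p.1 ∧ p'.2 ≤ p.2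

def pvQ (st : List (Int × Int)) (edu : Int) : Int :=
  pvM0 ((st.filter (fun p => decide (p.1 ≤ edu))).map (fun p => p.2))

theorem pvRel_insert (st ins : List (Int × Int)) (e v : Int) (h : pvRel st ins) :
    pvRel (pvFrontInsert st e v) (ins ++ [(e, v)]) := by
  obtain ⟨hsub, hdom⟩ := h
  unfold pvFrontInsert
  by_cases hany : st.any (fun p => decide (p.1 ≤ e) && decide (p.2 ≤ v)) = true
  · rw [if_pos hany]
    obtain ⟨p0, hp0, hc⟩ := List.any_eq_true.mp hany
    simp only [Bool.and_eq_true, decide_eq_true_eq] at hc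
    refine ⟨fun p hp => List.mem_append_left _ (hsub p hp), fun p hp => ?_⟩
    rcases List.mem_append.mp hp with hp | hp
    · exact hdom p hp
    · simp only [List.mem_singleton] at hp
      subst hp
      exact ⟨p0, hp0, hc.1, hc.2⟩
  · rw [if_neg hany]
    constructor
    · intro p hp
      rcases List.mem_append.mp hp with hp | hp
      · exact List.mem_append_left _ (hsub p (List.mem_filter.mp hp).1)
      · simp only [List.mem_singleton] at hp
        subst hp
        exact List.mem_append_right _ (by simp)
    · intro p hp
      rcases List.mem_append.mp hp with hp | hp
      · obtain ⟨p', hp', hle1, hle2⟩ := hdom p hp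
        by_cases hkeep : (decide (e ≤ p'.1) && decide (v ≤ p'.2)) = true
        · simp only [Bool.and_eq_true, decide_eq_true_eq] at hkeep
          exact ⟨(e, v), List.mem_append_right _ (by simp),
            le_trans hkeep.1 hle1, le_trans hkeep.2 hle2⟩
        · exact ⟨p', List.mem_append_left _ (List.mem_filter.mpr ⟨hp', by simp [hkeep]⟩),
            hle1, hle2⟩
      · simp only [List.mem_singleton] at hp
        subst hp
        exact ⟨(e, v), List.mem_append_right _ (by simp), le_refl _, le_refl _⟩

theorem pvRel_q (st ins : List (Int × Int)) (h : pvRel st ins) (edu : Int) :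
    pvQ st edu = pvQ ins edu := by
  obtain ⟨hsub, hdom⟩ := h
  refine (pvM0_eq_of_sub_dom _ _ ?_ ?_).symm
  · intro x hx
    simp only [List.mem_map, List.mem_filter, decide_eq_true_eq] at hx ⊢
    obtain ⟨p, ⟨hp, hpe⟩, rfl⟩ := hx
    exact ⟨p, ⟨hsub p hp, hpe⟩, rfl⟩
  · intro x hx
    simp only [List.mem_map, List.mem_filter, decide_eq_true_eq] at hx
    obtain ⟨p, ⟨hp, hpe⟩, rfl⟩ := hx
    obtain ⟨p', hp', hle1, hle2⟩ := hdom p hp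
    refine ⟨p'.2, ?_, hle2⟩
    simp only [List.mem_map, List.mem_filter, decide_eq_true_eq]
    exact ⟨p', ⟨hp', le_trans hle1 hpe⟩, rfl⟩

theorem pvAbsorb_spec (min_income higher_education : List Int) (inc : Int) :
    ∀ (rest : List Int) (st ins : List (Int × Int)), pvRel st ins →
    ∃ popped : List Int,
      rest = popped ++ (pvAbsorb min_income higher_education inc st rest).2
      ∧ (∀ i ∈ popped, PySem.List.pyGetD min_income i 0 ≤ inc)
      ∧ ((pvAbsorb min_income higher_education inc st rest).2 = []
          ∨ ∃ h t, (pvAbsorb min_income higher_education inc st rest).2 = h :: t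
              ∧ ¬ (PySem.List.pyGetD min_income h 0 ≤ inc))
      ∧ pvRel (pvAbsorb min_income higher_education inc st rest).1
          (ins ++ popped.map (fun i => (PySem.List.pyGetD higher_education i 0, i + 1))) := by
  intro rest
  induction rest with
  | nil =>
    intro st ins hrel
    exact ⟨[], by simp [pvAbsorb], by simp, Or.inl (by simp [pvAbsorb]), by simpa [pvAbsorb]⟩
  | cons i r ih =>
    intro st ins hrel
    by_cases hc : decide (PySem.List.pyGetD min_income i 0 ≤ inc) = true
    · have habs : pvAbsorb min_income higher_education inc st (i :: r)
          = pvAbsorb min_income higher_education inc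
              (pvFrontInsert st (PySem.List.pyGetD higher_education i 0) (i + 1)) r := by
        simp [pvAbsorb, hc]
      obtain ⟨popped, hsplit, hpop, hhead, hrel'⟩ :=
        ih (pvFrontInsert st (PySem.List.pyGetD higher_education i 0) (i + 1))
          (ins ++ [(PySem.List.pyGetD higher_education i 0, i + 1)])
          (pvRel_insert st ins (PySem.List.pyGetD higher_education i 0) (i + 1) hrel)
      refine ⟨i :: popped, ?_, ?_, ?_, ?_⟩
      · rw [habs]; simpa using hsplit
      · intro x hx
        rcases List.mem_cons.mp hx with rfl | hx
        · simpa using hc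
        · exact hpop x hx
      · rw [habs]; exact hhead
      · rw [habs]; simpa [List.append_assoc] using hrel'
    · have habs : pvAbsorb min_income higher_education inc st (i :: r) = (st, i :: r) := by
        simp [pvAbsorb, hc]
      refine ⟨[], by simp [habs], by simp, ?_, by simpa [habs]⟩
      rw [habs]
      exact Or.inr ⟨i, r, rfl, by simpa using hc⟩

theorem pvMain (N : Int) (min_income higher_education direct_children income has_higher_education parents_citizenship : List Int) :
    ∀ (rem : List Int) (res : List Int) (st : List (Int × Int)) (done rest : List Int),
      PySem.List.sorted (PySem.List.pyRange 0 N 1) (fun i => PySem.List.pyGetD min_income i 0) false = done ++ rest →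
      pvRel st (done.map (fun i => (PySem.List.pyGetD higher_education i 0, i + 1))) →
      (∀ i ∈ done, ∀ j ∈ rem, PySem.List.pyGetD min_income i 0 ≤ PySem.List.pyGetD income j 0) →
      rem.Pairwise (fun a b => PySem.List.pyGetD income a 0 ≤ PySem.List.pyGetD income b 0) →
      (rem.foldl (pvStep N min_income higher_education direct_children income has_higher_education parents_citizenship) (res, st, rest)).1
        = rem.foldl (fun r j => PySem.List.pySetD r j (pvF N min_income higher_education direct_children income has_higher_education parents_citizenship j)) res := by
  intro rem
  induction rem with
  | nil => intro res st done rest _ _ _ _; rfl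
  | cons j rem' ih =>
    intro res st done rest hsplit hrel h34 hpair
    rw [List.foldl_cons, List.foldl_cons]
    obtain ⟨popped, hpsplit, hpop, hhead, hrel'⟩ :=
      pvAbsorb_spec min_income higher_education (PySem.List.pyGetD income j 0) rest st
        (done.map (fun i => (PySem.List.pyGetD higher_education i 0, i + 1))) hrel
    have hrel'' : pvRel (pvAbsorb min_income higher_education (PySem.List.pyGetD income j 0) st rest).1
        ((done ++ popped).map (fun i => (PySem.List.pyGetD higher_education i 0, i + 1))) := by
      rw [List.map_append]
      exact hrel'
    have hsplit' : PySem.List.sorted (PySem.List.pyRange 0 N 1)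
          (fun i => PySem.List.pyGetD min_income i 0) false
        = (done ++ popped) ++ (pvAbsorb min_income higher_education (PySem.List.pyGetD income j 0) st rest).2 := by
      conv_lhs => rw [hsplit, hpsplit]
      rw [List.append_assoc]
    have hpairc := List.pairwise_cons.mp hpair
    have h34' : ∀ i ∈ done ++ popped, ∀ j' ∈ rem',
        PySem.List.pyGetD min_income i 0 ≤ PySem.List.pyGetD income j' 0 := by
      intro i hi j' hj'
      rcases List.mem_append.mp hi with hi | hi
      · exact h34 i hi j' (List.mem_cons_of_mem _ hj')
      · exact le_trans (hpop i hi) (hpairc.1 j' hj')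
    -- the computed per-query value equals pvF
    have hdone' : ∀ i, i ∈ done ++ popped ↔
        (i ∈ PySem.List.pyRange 0 N 1 ∧ PySem.List.pyGetD min_income i 0 ≤ PySem.List.pyGetD income j 0) := by
      intro i
      constructor
      · intro hi
        have hic : i ∈ PySem.List.sorted (PySem.List.pyRange 0 N 1)
            (fun i => PySem.List.pyGetD min_income i 0) false := by
          rw [hsplit']
          exact List.mem_append_left _ hi
        refine ⟨(PySem.List.sorted_perm _ _ _).mem_iff.mp hic, ?_⟩
        rcases List.mem_append.mp hi with hi | hi
        · exact h34 i hi j (by simp)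
        · exact hpop i hi
      · rintro ⟨hir, hmi⟩
        have hic : i ∈ (done ++ popped)
            ++ (pvAbsorb min_income higher_education (PySem.List.pyGetD income j 0) st rest).2 := by
          rw [← hsplit']
          exact (PySem.List.sorted_perm _ _ _).mem_iff.mpr hir
        rcases List.mem_append.mp hic with hic | hic
        · exact hic
        · exfalso
          rcases hhead with hnil | ⟨h, t, heq, hgt⟩
          · rw [hnil] at hic
            simp at hic
          · have hpwC : (((done ++ popped) ++ h :: t).Pairwise
                (fun a b => PySem.List.pyGetD min_income a 0 ≤ PySem.List.pyGetD min_income b 0)) := by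
              rw [← heq, ← hsplit']
              exact PySem.List.sorted_pairwise _ _
            have hpwR := (List.pairwise_append.mp hpwC).2.1
            rw [heq] at hic
            rcases List.mem_cons.mp hic with rfl | hit
            · exact hgt hmi
            · exact hgt (le_trans ((List.pairwise_cons.mp hpwR).1 i hit) hmi)
    have hq : pvQ (pvAbsorb min_income higher_education (PySem.List.pyGetD income j 0) st rest).1
          (PySem.List.pyGetD has_higher_education j 0)
        = pvM0 (((PySem.List.pyRange 0 N 1).filter
            (fun i => decide (PySem.List.pyGetD min_income i 0 ≤ PySem.List.pyGetD income j 0)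
              && decide (PySem.List.pyGetD higher_education i 0 ≤ PySem.List.pyGetD has_higher_education j 0))).map
            (fun i => i + 1)) := by
      rw [pvRel_q _ _ hrel'']
      unfold pvQ
      apply pvM0_congr_mem
      intro x
      constructor
      · intro hx
        obtain ⟨q, hqf, rfl⟩ := List.mem_map.mp hx
        obtain ⟨hqm, hqe⟩ := List.mem_filter.mp hqf
        obtain ⟨i, hi, rfl⟩ := List.mem_map.mp hqm
        simp only [decide_eq_true_eq] at hqe
        rcases (hdone' i).mp hi with ⟨hir, hmi⟩
        exact List.mem_map.mpr ⟨i, List.mem_filter.mpr ⟨hir, by simp [hmi]; exact hqe⟩, rfl⟩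
      · intro hx
        obtain ⟨i, hif, rfl⟩ := List.mem_map.mp hx
        obtain ⟨hir, hcond⟩ := List.mem_filter.mp hif
        simp only [Bool.and_eq_true, decide_eq_true_eq] at hcond
        refine List.mem_map.mpr ⟨(PySem.List.pyGetD higher_education i 0, i + 1), ?_, rfl⟩
        refine List.mem_filter.mpr ⟨List.mem_map.mpr ⟨i, (hdone' i).mpr ⟨hir, hcond.1⟩, rfl⟩, ?_⟩
        simp [hcond.2]
    have hstep : pvStep N min_income higher_education direct_children income has_higher_education parents_citizenship (res, st, rest) j
        = (PySem.List.pySetD res j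
            (pvF N min_income higher_education direct_children income has_higher_education parents_citizenship j),
          (pvAbsorb min_income higher_education (PySem.List.pyGetD income j 0) st rest).1,
          (pvAbsorb min_income higher_education (PySem.List.pyGetD income j 0) st rest).2) := by
      unfold pvStep pvF
      dsimp only
      rw [← hq]
      rfl
    rw [hstep]
    exact ih (PySem.List.pySetD res j
        (pvF N min_income higher_education direct_children income has_higher_education parents_citizenship j))
      (pvAbsorb min_income higher_education (PySem.List.pyGetD income j 0) st rest).1
      (done ++ popped)
      (pvAbsorb min_income higher_education (PySem.List.pyGetD income j 0) st rest).2
      hsplit' hrel'' h34' hpairc.2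

theorem pvFoldLen (f : Int → Int) :
    ∀ (rem : List Int) (res : List Int),
      (rem.foldl (fun r j => PySem.List.pySetD r j (f j)) res).length = res.length := by
  intro rem
  induction rem with
  | nil => intro res; rfl
  | cons j r ih =>
    intro res
    rw [List.foldl_cons, ih]
    exact PySem.List.length_pySetD res j (f j)

theorem pvWritesAux (f : Int → Int) (Q : Int) :
    ∀ (rem : List Int) (res : List Int), res.length = Q.toNat →
      (∀ j ∈ rem, 0 ≤ j ∧ j < Q) →
      ∀ m : Nat, m < Q.toNat →
        PySem.List.pyGetD (rem.foldl (fun r j => PySem.List.pySetD r j (f j)) res) (m : Int) 0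
          = if (m : Int) ∈ rem then f m else PySem.List.pyGetD res (m : Int) 0 := by
  intro rem
  induction rem with
  | nil => intro res _ _ m _; simp
  | cons j r ih =>
    intro res hlen hmem m hm
    obtain ⟨hj0, hjQ⟩ := hmem j (by simp)
    have hjn : j = ((j.toNat : Nat) : Int) := by omega
    have hlt : j.toNat < res.length := by omega
    have hset : PySem.List.pySetD res j (f j) = PySem.List.pySetD res (j.toNat : Int) (f j) := by
      rw [← hjn]
    rw [List.foldl_cons,
      ih (PySem.List.pySetD res j (f j))
        (by rw [PySem.List.length_pySetD]; exact hlen)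
        (fun x hx => hmem x (by simp [hx])) m hm]
    rw [hset, PySem.List.pyGetD_pySetD_natCast res j.toNat m (f j) 0 hlt]
    by_cases hmr : (m : Int) ∈ r
    · simp [hmr]
    · by_cases hmj : m = j.toNat
      · have hmje : (m : Int) = j := by omega
        rw [if_neg hmr, if_pos hmj, if_pos (show (m : Int) ∈ j :: r by simp [hmje]), hmje]
      · rw [if_neg hmr, if_neg hmj,
          if_neg (show ¬ (m : Int) ∈ j :: r by
            simp only [List.mem_cons]; push Not; exact ⟨by omega, hmr⟩)]

theorem pvWrites (f : Int → Int) (Q : Int) (order : List Int)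
    (hperm : order.Perm (PySem.List.pyRange 0 Q 1)) :
    order.foldl (fun r j => PySem.List.pySetD r j (f j)) (List.replicate Q.toNat 0)
      = (PySem.List.pyRange 0 Q 1).map f := by
  have hmem : ∀ j ∈ order, 0 ≤ j ∧ j < Q := by
    intro j hj
    have := hperm.mem_iff.mp hj
    rcases PySem.List.mem_pyRange_one.mp this with ⟨h1, h2⟩
    exact ⟨h1, by omega⟩
  have hlenL : (order.foldl (fun r j => PySem.List.pySetD r j (f j)) (List.replicate Q.toNat 0)).length = Q.toNat := by
    rw [pvFoldLen]; simp
  have hlenR : ((PySem.List.pyRange 0 Q 1).map f).length = Q.toNat := by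
    simp [PySem.List.length_pyRange_one]
  apply List.ext_getElem (by rw [hlenL, hlenR])
  intro m hmL hmR
  have hm : m < Q.toNat := by omega
  have hQ0 : (m : Int) < Q := by omega
  have hinord : (m : Int) ∈ order := by
    rw [hperm.mem_iff]
    exact PySem.List.mem_pyRange_one.mpr ⟨by omega, hQ0⟩
  have hL := pvWritesAux f Q order (List.replicate Q.toNat 0) (by simp) hmem m hm
  rw [if_pos hinord] at hL
  have hL' : (order.foldl (fun r j => PySem.List.pySetD r j (f j)) (List.replicate Q.toNat 0))[m]
      = f (m : Int) := by
    have := hL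
    rw [PySem.List.pyGetD_natCast] at this
    rwa [List.getD_eq_getElem _ _ (by omega)] at this
  rw [hL']
  have : (PySem.List.pyRange 0 Q 1)[m]'(by simpa [PySem.List.length_pyRange_one] using hmR) = (m : Int) := by
    rw [PySem.List.getElem_pyRange_one]
    omega
  simp [this]

theorem pvAval (N : Int) (min_income higher_education direct_children income has_higher_education parents_citizenship : List Int) (j : Int) :
    PySem.List.minD
      ((PySem.List.pyRange 0 N 1).foldl
        (fun s i =>
          if (PySem.List.pyGetD direct_children i 0 == 1
                && PySem.List.pyGetD parents_citizenship j 0 == i + 1)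
              || (decide (PySem.List.pyGetD income j 0 ≥ PySem.List.pyGetD min_income i 0)
                && decide (PySem.List.pyGetD has_higher_education j 0 ≥ PySem.List.pyGetD higher_education i 0))
          then PySem.Set.add s (i + 1) else s)
        PySem.Set.empty)
      (fun x => x) 0
    = pvF N min_income higher_education direct_children income has_higher_education parents_citizenship j := by
  unfold pvF
  dsimp only
  generalize PySem.List.pyGetD income j 0 = inc
  generalize PySem.List.pyGetD has_higher_education j 0 = edu
  generalize hp : PySem.List.pyGetD parents_citizenship j 0 = p
  generalize hTL : ((PySem.List.pyRange 0 N 1).filter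
      (fun i => decide (PySem.List.pyGetD min_income i 0 ≤ inc)
        && decide (PySem.List.pyGetD higher_education i 0 ≤ edu))).map (fun i => i + 1) = TL
  generalize hSdef : (PySem.List.pyRange 0 N 1).foldl
      (fun s i =>
        if (PySem.List.pyGetD direct_children i 0 == 1 && p == i + 1)
            || (decide (inc ≥ PySem.List.pyGetD min_income i 0)
              && decide (edu ≥ PySem.List.pyGetD higher_education i 0))
        then PySem.Set.add s (i + 1) else s) PySem.Set.empty = S
  have hchange : PySem.List.minD S (fun x => x) 0 = pvM0 S := rfl
  rw [hchange]
  have hmemS : ∀ x, x ∈ S ↔ ∃ i, (0 ≤ i ∧ i < N)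
      ∧ ((PySem.List.pyGetD direct_children i 0 = 1 ∧ p = i + 1)
          ∨ (PySem.List.pyGetD min_income i 0 ≤ inc ∧ PySem.List.pyGetD higher_education i 0 ≤ edu))
      ∧ x = i + 1 := by
    intro x
    rw [← hSdef, pv_mem_fold]
    constructor
    · rintro (h | ⟨i, hir, hc, rfl⟩)
      · simp [PySem.Set.empty] at h
      · rcases PySem.List.mem_pyRange_one.mp hir with ⟨hi0, hiN⟩
        simp only [Bool.or_eq_true, Bool.and_eq_true, beq_iff_eq, decide_eq_true_eq,
          ge_iff_le] at hc
        exact ⟨i, ⟨hi0, hiN⟩, hc, rfl⟩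
    · rintro ⟨i, ⟨hi0, hiN⟩, hc, rfl⟩
      refine Or.inr ⟨i, PySem.List.mem_pyRange_one.mpr ⟨hi0, hiN⟩, ?_, rfl⟩
      simp only [Bool.or_eq_true, Bool.and_eq_true, beq_iff_eq, decide_eq_true_eq, ge_iff_le]
      exact hc
  have hTLmem : ∀ x, x ∈ TL ↔ ∃ i, (0 ≤ i ∧ i < N)
      ∧ PySem.List.pyGetD min_income i 0 ≤ inc ∧ PySem.List.pyGetD higher_education i 0 ≤ edu
      ∧ x = i + 1 := by
    intro x
    rw [← hTL]
    constructor
    · intro hx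
      obtain ⟨i, hif, rfl⟩ := List.mem_map.mp hx
      obtain ⟨hir, hcond⟩ := List.mem_filter.mp hif
      rcases PySem.List.mem_pyRange_one.mp hir with ⟨hi0, hiN⟩
      simp only [Bool.and_eq_true, decide_eq_true_eq] at hcond
      exact ⟨i, ⟨hi0, hiN⟩, hcond.1, hcond.2, rfl⟩
    · rintro ⟨i, ⟨hi0, hiN⟩, h1, h2, rfl⟩
      exact List.mem_map.mpr ⟨i,
        List.mem_filter.mpr ⟨PySem.List.mem_pyRange_one.mpr ⟨hi0, hiN⟩, by simp [h1, h2]⟩, rfl⟩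
  by_cases hguard : (decide (1 ≤ p) && decide (p ≤ N)
      && (PySem.List.pyGetD direct_children (p - 1) 0 == 1)) = true
  · rw [if_pos hguard]
    have hp1 : 1 ≤ p ∧ p ≤ N ∧ PySem.List.pyGetD direct_children (p - 1) 0 = 1 := by
      simpa [and_assoc] using hguard
    have hSiff : ∀ x, x ∈ S ↔ (x = p ∨ x ∈ TL) := by
      intro x
      rw [hmemS x]
      constructor
      · rintro ⟨i, ⟨hi0, hiN⟩, hc, rfl⟩
        rcases hc with ⟨hdc, hpc⟩ | ⟨h1, h2⟩
        · left; omega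
        · right; exact (hTLmem _).mpr ⟨i, ⟨hi0, hiN⟩, h1, h2, rfl⟩
      · rintro (hxp | hx)
        · refine ⟨p - 1, ⟨by omega, by omega⟩, Or.inl ⟨hp1.2.2, by omega⟩, by omega⟩
        · rcases (hTLmem _).mp hx with ⟨i, ⟨hi0, hiN⟩, h1, h2, rfl⟩
          exact ⟨i, ⟨hi0, hiN⟩, Or.inr ⟨h1, h2⟩, rfl⟩
    have hp0 : (p == (0 : Int)) = false := by simp; omega
    rw [hp0]
    simp only [Bool.false_eq_true, if_false]
    by_cases hTLnil : TL = []
    · have ht : pvM0 TL = 0 := by rw [hTLnil]; rfl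
      rw [ht]
      simp only [BEq.rfl, if_true]
      have hiff : ∀ x, x ∈ S ↔ x ∈ [p] := by
        intro x
        rw [hSiff x, hTLnil]
        simp
      rw [pvM0_congr_mem S [p] hiff]
      have := (pvM0_spec [p] (by simp)).1
      simpa using this
    · obtain ⟨htmem, htmin⟩ := pvM0_spec TL hTLnil
      have ht1 : 1 ≤ pvM0 TL := by
        rcases (hTLmem _).mp htmem with ⟨i, ⟨hi0, _⟩, _, _, heq⟩
        omega
      have ht0 : (pvM0 TL == (0 : Int)) = false := by simp; omega
      rw [ht0]
      simp only [Bool.false_eq_true, if_false]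
      have hSne : S ≠ [] := by
        intro h0
        have := (hSiff p).mpr (Or.inl rfl)
        rw [h0] at this
        simp at this
      obtain ⟨hmS, hminS⟩ := pvM0_spec S hSne
      have h1 : pvM0 S ≤ min p (pvM0 TL) :=
        le_min (hminS p ((hSiff p).mpr (Or.inl rfl)))
          (hminS _ ((hSiff _).mpr (Or.inr htmem)))
      have h2 : min p (pvM0 TL) ≤ pvM0 S := by
        rcases (hSiff _).mp hmS with h | h
        · calc min p (pvM0 TL) ≤ p := min_le_left _ _
            _ = pvM0 S := h.symm
        · exact le_trans (min_le_right _ _) (htmin _ h)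
      omega
  · rw [if_neg hguard]
    simp only [BEq.rfl, if_true]
    have hng : ¬ (1 ≤ p ∧ p ≤ N ∧ PySem.List.pyGetD direct_children (p - 1) 0 = 1) := by
      intro hc
      exact hguard (by simp [hc.1, hc.2.1, hc.2.2])
    have hiff : ∀ x, x ∈ S ↔ x ∈ TL := by
      intro x
      rw [hmemS x, hTLmem x]
      constructor
      · rintro ⟨i, ⟨hi0, hiN⟩, hc, rfl⟩
        rcases hc with ⟨hdc, hpc⟩ | ⟨h1, h2⟩
        · exfalso
          apply hng
          refine ⟨by omega, by omega, ?_⟩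
          have : p - 1 = i := by omega
          rw [this]
          exact hdc
        · exact ⟨i, ⟨hi0, hiN⟩, h1, h2, rfl⟩
      · rintro ⟨i, ⟨hi0, hiN⟩, h1, h2, rfl⟩
        exact ⟨i, ⟨hi0, hiN⟩, Or.inr ⟨h1, h2⟩, rfl⟩
    exact pvM0_congr_mem S TL hiff

-- ===== VERDICT (by name: the statement is the Claim_ definition above) =====
theorem find_country_spec : Claim_equal_find_country := by
  intro N min_income higher_education direct_children Q income has_higher_education parents_citizenship _ _
  unfold Spec_find_country find_country find_country_alt
  dsimp only
  rw [PySem.List.pyRepeat_singleton]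
  rw [pvMain N min_income higher_education direct_children income has_higher_education parents_citizenship
      (PySem.List.sorted (PySem.List.pyRange 0 Q 1) (fun j => PySem.List.pyGetD income j 0) false)
      (List.replicate Q.toNat 0) [] []
      (PySem.List.sorted (PySem.List.pyRange 0 N 1) (fun i => PySem.List.pyGetD min_income i 0) false)
      rfl (by constructor <;> simp) (by simp)
      (PySem.List.sorted_pairwise _ _)]
  rw [pvWrites _ Q _ (PySem.List.sorted_perm _ _ _)]
  exact List.map_congr_left (fun j _ =>
    pvAval N min_income higher_education direct_children income has_higher_education parents_citizenship j)
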